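-- pv_equiv track=rewrite | github.com/genta-kawabata/at-coder | abc195/c/main.py | get_total_num_comma
-- ===== SOURCE A (Python) =====
-- def get_total_num_comma(keta):
--     if keta <= 3:
--         return 0
--     else:
--         max_keta_1 = pow(10, keta) - 1
--         min_keta_1 = pow(10, keta - 1) - 1
--         total_num_keta_1 = get_total_num_comma(keta - 1)
--         num_comma = get_num_comma(keta)
--         total_num_keta = (max_keta_1 - min_keta_1) * num_comma
--
--         result = total_num_keta + total_num_keta_1
--
--         return result
--
-- def get_num_comma(keta):
--     return (keta - 1) // 3
-- ===== SOURCE B (Python) =====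
-- def get_total_num_comma(keta):
--     if keta <= 3:
--         return 0
--     j = (keta - 1) // 3
--     return j * pow(10, keta) - (pow(1000, j + 1) - 1000) // 999
-- ===== Notes on version B (the rewrite author's own statement) =====
-- stated objective: faster
-- what changed: Replaced the per-digit-length recursion (one bignum power and multiplication per length) by a closed-form expression: counting each comma position separately over all numbers below the top power of ten gives a geometric series, evaluated with two powers and one exact division.
import Mathlib
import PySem

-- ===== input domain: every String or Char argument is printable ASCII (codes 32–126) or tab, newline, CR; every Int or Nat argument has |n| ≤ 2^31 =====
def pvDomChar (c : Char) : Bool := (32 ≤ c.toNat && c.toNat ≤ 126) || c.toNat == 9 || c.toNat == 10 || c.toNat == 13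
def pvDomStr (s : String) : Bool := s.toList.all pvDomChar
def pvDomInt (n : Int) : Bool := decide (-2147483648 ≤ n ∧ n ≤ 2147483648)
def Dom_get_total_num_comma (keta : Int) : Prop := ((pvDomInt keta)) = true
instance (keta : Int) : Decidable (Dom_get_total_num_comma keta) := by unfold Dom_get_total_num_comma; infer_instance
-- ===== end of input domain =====

-- B replaces A's recursion over digit lengths by a closed-form geometric-series formula (faster: O(1) bignum ops instead of O(keta)).

-- ===== PORT A =====
def get_num_comma (keta : Int) : Int := PySem.Int.floordiv (keta - 1) 3

def get_total_num_comma (keta : Int) : Int :=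
  if keta ≤ 3 then 0
  else
    let max_keta_1 := (10 : Int) ^ keta.toNat - 1
    let min_keta_1 := (10 : Int) ^ (keta - 1).toNat - 1
    let total_num_keta_1 := get_total_num_comma (keta - 1)
    let num_comma := get_num_comma keta
    let total_num_keta := (max_keta_1 - min_keta_1) * num_comma
    total_num_keta + total_num_keta_1
termination_by keta.toNat
decreasing_by omega

-- ===== PORT B =====
def get_total_num_comma_alt (keta : Int) : Int :=
  if keta ≤ 3 then 0
  else
    let j := PySem.Int.floordiv (keta - 1) 3
    j * (10 : Int) ^ keta.toNat - PySem.Int.floordiv ((1000 : Int) ^ (j + 1).toNat - 1000) 999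

-- ===== PRECONDITION & SPEC =====
def Spec_get_total_num_comma (keta : Int) (out : Int) : Prop := out = get_total_num_comma_alt keta
instance (keta : Int) (out : Int) : Decidable (Spec_get_total_num_comma keta out) := by unfold Spec_get_total_num_comma; infer_instance

-- ===== CLAIM (what is proved, stated in full; the proofs are below) =====
def Claim_equal_get_total_num_comma : Prop := ∀ (keta : Int), Dom_get_total_num_comma keta → Spec_get_total_num_comma keta (get_total_num_comma keta)

-- ===== LEMMAS AND PROOFS =====

-- geometric partial sum  S J = 1000^1 + … + 1000^J
def pvGeo : Nat → Int
  | 0 => 0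
  | J + 1 => pvGeo J + 1000 ^ (J + 1)

theorem pvGeo_mul (J : Nat) : (999 : Int) * pvGeo J = 1000 ^ (J + 1) - 1000 := by
  induction J with
  | zero => simp [pvGeo]
  | succ n ih => simp [pvGeo]; ring_nf; ring_nf at ih; linarith [ih]

theorem floordiv_geo (J : Nat) :
    PySem.Int.floordiv ((1000 : Int) ^ (J + 1) - 1000) 999 = pvGeo J := by
  rw [PySem.Int.floordiv_eq_ediv_of_pos (by norm_num), ← pvGeo_mul J]
  exact Int.mul_ediv_cancel_left _ (by norm_num)

-- B's value at a natural number ≥ 4, in closed Nat terms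
theorem alt_closed (k : Nat) (hk : 4 ≤ k) :
    get_total_num_comma_alt (k : Int) = ((k - 1) / 3 : Nat) * (10 : Int) ^ k - pvGeo ((k - 1) / 3) := by
  have h1 : ((k : Int) - 1) = ((k - 1 : Nat) : Int) := by omega
  have h2 : PySem.Int.floordiv ((k : Int) - 1) 3 = (((k - 1) / 3 : Nat) : Int) := by
    rw [h1]; exact_mod_cast PySem.Int.floordiv_natCast (k - 1) 3
  unfold get_total_num_comma_alt
  rw [if_neg (by exact_mod_cast by omega : ¬ (k : Int) ≤ 3)]
  simp only [h2]
  have h3 : ((((k - 1) / 3 : Nat) : Int) + 1).toNat = (k - 1) / 3 + 1 := by omega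
  have h4 : (k : Int).toNat = k := by omega
  rw [h3, h4, floordiv_geo]

theorem main_nat (k : Nat) : get_total_num_comma (k : Int) = get_total_num_comma_alt (k : Int) := by
  induction k with
  | zero =>
    rw [get_total_num_comma]
    unfold get_total_num_comma_alt
    norm_num
  | succ n ih =>
    by_cases hn : n + 1 ≤ 3
    · rw [get_total_num_comma]
      unfold get_total_num_comma_alt
      rw [if_pos (by exact_mod_cast hn), if_pos (by exact_mod_cast hn)]
    · -- n ≥ 3
      have hk4 : 4 ≤ n + 1 := by omega
      rw [get_total_num_comma]
      rw [if_neg (by exact_mod_cast hn)]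
      simp only [get_num_comma]
      have hsub : ((n : Int) + 1 - 1) = (n : Int) := by ring
      have hcast : ((n + 1 : Nat) : Int) = (n : Int) + 1 := by push_cast; ring
      rw [hcast, hsub, ih]
      have hJ : PySem.Int.floordiv (n : Int) 3 = ((n / 3 : Nat) : Int) := by
        exact_mod_cast PySem.Int.floordiv_natCast n 3
      have htop : ((n : Int) + 1).toNat = n + 1 := by omega
      have hnt : (n : Int).toNat = n := by omega
      rw [hJ, htop, hnt]
      -- rewrite B's side at n+1 in closed form
      have hB := alt_closed (n + 1) hk4
      have hB' : ((n + 1 : Nat) : Int) = (n : Int) + 1 := by push_cast; ring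
      rw [hB'] at hB
      have hidx : (n + 1 - 1) = n := by omega
      rw [hidx] at hB
      rw [hB]
      by_cases h3 : n ≤ 3
      · -- n = 3 exactly
        have hn3 : n = 3 := by omega
        subst hn3
        unfold get_total_num_comma_alt
        rw [if_pos (by norm_num)]
        norm_num [pvGeo]
      · -- n ≥ 4 : also use the closed form for B at n
        have hA := alt_closed n (by omega)
        rw [hA]
        set J := n / 3 with hJdef
        by_cases hmod : n % 3 = 0
        · -- n = 3J, (n-1)/3 = J - 1, J ≥ 2
          have hJ2 : 2 ≤ J := by omega
          have hn1 : (n - 1) / 3 = J - 1 := by omega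
          rw [hn1]
          have hJsucc : J - 1 + 1 = J := by omega
          have hgeo : pvGeo J = pvGeo (J - 1) + 1000 ^ J := by
            conv_lhs => rw [← hJsucc]
            rw [pvGeo]; rw [hJsucc]
          have hpow : (1000 : Int) ^ J = 10 ^ n := by
            have : (1000 : Int) = 10 ^ 3 := by norm_num
            rw [this, ← pow_mul]
            congr 1; omega
          have hcastJ : (((J - 1) : Nat) : Int) = (J : Int) - 1 := by omega
          rw [hgeo, hpow, hcastJ]
          have hps : (10 : Int) ^ (n + 1) = 10 * 10 ^ n := by rw [pow_succ]; ring
          rw [hps]; ring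
        · -- same quotient
          have hn1 : (n - 1) / 3 = J := by omega
          rw [hn1]
          have hps : (10 : Int) ^ (n + 1) = 10 * 10 ^ n := by rw [pow_succ]; ring
          rw [hps]; ring

-- ===== VERDICT (by name: the statement is the Claim_ definition above) =====
theorem get_total_num_comma_spec : Claim_equal_get_total_num_comma := by
  intro keta _
  unfold Spec_get_total_num_comma
  by_cases h : keta ≤ 3
  · rw [get_total_num_comma]
    unfold get_total_num_comma_alt
    rw [if_pos h, if_pos h]
  · obtain ⟨n, rfl⟩ := Int.eq_ofNat_of_zero_le (by omega : (0:Int) ≤ keta)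
    exact main_nat n
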